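-- pv_equiv track=rewrite | github.com/sheilsplenbluli/csvwrangler | csvwrangler/streak.py | streak_column
-- ===== SOURCE A (Python) =====
-- from typing import List, Dict, Any, Optional
--
-- def _matches(value: str, target: str, case_sensitive: bool) -> bool:
--     if case_sensitive:
--         return value == target
--     return value.lower() == target.lower()
--
-- def streak_column(
--     rows: List[Dict[str, Any]],
--     column: str,
--     target: str,
--     dest: Optional[str] = None,
--     case_sensitive: bool = True,
-- ) -> List[Dict[str, Any]]:
--     """Add a column counting the current consecutive streak of *target* in *column*.
--
--     The counter resets to 0 whenever the value does not match.
--     """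
--     dest = dest or f"{column}_streak"
--     result = []
--     count = 0
--     for row in rows:
--         val = row.get(column, "")
--         if _matches(str(val), target, case_sensitive):
--             count += 1
--         else:
--             count = 0
--         out = dict(row)
--         out[dest] = str(count)
--         result.append(out)
--     return result
-- ===== SOURCE B (Python) =====
-- from typing import List, Dict, Any, Optional
--
-- def _matches(value: str, target: str, case_sensitive: bool) -> bool:
--     if case_sensitive:
--         return value == target
--     return value.lower() == target.lower()
--
-- def streak_column(
--     rows: List[Dict[str, Any]],
--     column: str,
--     target: str,
--     dest: Optional[str] = None,
--     case_sensitive: bool = True,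
-- ) -> List[Dict[str, Any]]:
--     """Add a column counting the current consecutive streak of *target* in *column*.
--
--     Two-phase formulation: first a flag list of matches, then streak lengths
--     computed as distance to the most recent non-match position, then zip.
--     """
--     dest = dest or f"{column}_streak"
--     flags = [1 if _matches(str(row.get(column, "")), target, case_sensitive) else 0
--              for row in rows]
--     counts = []
--     last_reset = -1
--     for i, flag in enumerate(flags):
--         if not flag:
--             last_reset = i
--         counts.append(i - last_reset)
--     result = []
--     for row, count in zip(rows, counts):
--         out = dict(row)
--         out[dest] = str(count)
--         result.append(out)
--     return result
-- ===== Notes on version B (the rewrite author's own statement) =====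
-- stated objective: alternative
-- what changed: Replaces A's single loop with a running reset-on-mismatch counter by a three-phase pipeline: a match-flag list, streak lengths computed arithmetically as index minus the last non-match index, and a zip that writes the new column.
import Mathlib
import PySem

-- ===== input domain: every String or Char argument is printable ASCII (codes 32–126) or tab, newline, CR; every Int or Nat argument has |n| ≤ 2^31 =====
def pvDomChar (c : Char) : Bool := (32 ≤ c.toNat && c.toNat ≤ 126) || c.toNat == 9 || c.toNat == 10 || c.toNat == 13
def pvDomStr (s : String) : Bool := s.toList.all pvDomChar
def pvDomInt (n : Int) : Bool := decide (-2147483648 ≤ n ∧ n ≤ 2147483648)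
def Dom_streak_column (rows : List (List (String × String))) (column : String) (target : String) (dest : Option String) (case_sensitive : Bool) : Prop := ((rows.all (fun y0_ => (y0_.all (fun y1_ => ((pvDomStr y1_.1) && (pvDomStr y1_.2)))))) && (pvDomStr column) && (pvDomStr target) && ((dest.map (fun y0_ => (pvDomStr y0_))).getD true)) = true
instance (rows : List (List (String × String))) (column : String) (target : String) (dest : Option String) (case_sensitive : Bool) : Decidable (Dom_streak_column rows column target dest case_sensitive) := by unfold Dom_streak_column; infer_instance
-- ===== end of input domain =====

-- B recomputes the streaks in three phases (match-flag list, index-minus-last-reset arithmetic, zip)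
-- instead of A's single loop with a reset-on-mismatch counter; same cost, different decomposition.

-- ===== PORT A =====
-- `_matches(value, target, case_sensitive)`
def pvMatches (value target : String) (case_sensitive : Bool) : Bool :=
  if case_sensitive then value == target
  else PySem.Str.lower value == PySem.Str.lower target

-- `dest = dest or f"{column}_streak"`  (None and "" are falsy)
def pvDest (column : String) (dest : Option String) : String :=
  match dest with
  | none => column ++ "_streak"
  | some d => if d = "" then column ++ "_streak" else d

def streak_column (rows : List (List (String × String))) (column : String) (target : String) (dest : Option String) (case_sensitive : Bool) : List (List (String × String)) :=
  let dest' := pvDest column dest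
  -- the loop carries (result, count); each row is a dict, read through PySem.Dict
  (rows.foldl
    (fun (st : List (List (String × String)) × Int) row =>
      let d := PySem.Dict.ofList row
      let val := PySem.Dict.getD d column ""
      let count := if pvMatches val target case_sensitive then st.2 + 1 else 0
      let out := (PySem.Dict.insert d dest' (PySem.Int.toStr count)).items
      (st.1 ++ [out], count))
    ([], 0)).1

-- ===== PORT B =====
-- phase 2 of Source B: counts[i] = i - last_reset, last_reset updated on a zero flag
def pvCounts : Int → Int → List Int → List Int
  | _, _, [] => []
  | i, last_reset, f :: fs =>
    let lr := if f = 0 then i else last_reset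
    (i - lr) :: pvCounts (i + 1) lr fs

def streak_column_alt (rows : List (List (String × String))) (column : String) (target : String) (dest : Option String) (case_sensitive : Bool) : List (List (String × String)) :=
  let dest' := pvDest column dest
  let flags := rows.map (fun row =>
    if pvMatches (PySem.Dict.getD (PySem.Dict.ofList row) column "") target case_sensitive
    then (1 : Int) else 0)
  let counts := pvCounts 0 (-1) flags
  List.zipWith
    (fun row count => (PySem.Dict.insert (PySem.Dict.ofList row) dest' (PySem.Int.toStr count)).items)
    rows counts

-- ===== PRECONDITION & SPEC =====
def Spec_streak_column (rows : List (List (String × String))) (column : String) (target : String) (dest : Option String) (case_sensitive : Bool) (out : List (List (String × String))) : Prop := out = streak_column_alt rows column target dest case_sensitive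
instance (rows : List (List (String × String))) (column : String) (target : String) (dest : Option String) (case_sensitive : Bool) (out : List (List (String × String))) : Decidable (Spec_streak_column rows column target dest case_sensitive out) := by unfold Spec_streak_column; infer_instance

-- ===== CLAIM (what is proved, stated in full; the proofs are below) =====
def Claim_equal_streak_column : Prop := ∀ (rows : List (List (String × String))) (column : String) (target : String) (dest : Option String) (case_sensitive : Bool), Dom_streak_column rows column target dest case_sensitive → Spec_streak_column rows column target dest case_sensitive (streak_column rows column target dest case_sensitive)

-- ===== LEMMAS AND PROOFS =====

-- the sequence of counter values A's loop produces, as a direct recursion over the rows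
def pvStreaks (column target : String) (cs : Bool) : Int → List (List (String × String)) → List Int
  | _, [] => []
  | c, r :: rs =>
    let c' := if pvMatches (PySem.Dict.getD (PySem.Dict.ofList r) column "") target cs
              then c + 1 else 0
    c' :: pvStreaks column target cs c' rs

-- B's index arithmetic reproduces A's counter sequence: with lr the last reset index and
-- c = i - 1 - lr the streak ending just before position i, pvCounts emits pvStreaks.
theorem pvCounts_eq_pvStreaks (column target : String) (cs : Bool)
    (rows : List (List (String × String))) :
    ∀ (i lr : Int),
      pvCounts i lr (rows.map (fun row =>
        if pvMatches (PySem.Dict.getD (PySem.Dict.ofList row) column "") target cs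
        then (1 : Int) else 0)) =
      pvStreaks column target cs (i - 1 - lr) rows := by
  induction rows with
  | nil => intro i lr; simp [pvCounts, pvStreaks]
  | cons r rs ih =>
    intro i lr
    simp only [List.map_cons, pvCounts, pvStreaks]
    by_cases hm : pvMatches (PySem.Dict.getD (PySem.Dict.ofList r) column "") target cs
    · rw [if_pos hm, if_pos hm, if_neg (by norm_num : ¬ (1 : Int) = 0), ih (i + 1) lr,
          List.cons.injEq]
      refine ⟨by omega, ?_⟩
      congr 1
      omega
    · rw [if_neg hm, if_neg hm, if_pos rfl, ih (i + 1) i, List.cons.injEq]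
      refine ⟨by omega, ?_⟩
      congr 1
      omega

-- A's accumulating fold is the zip of the rows with A's counter sequence
theorem pvFoldA_eq_zip (column target dest' : String) (cs : Bool)
    (rows : List (List (String × String))) :
    ∀ (res : List (List (String × String))) (c : Int),
      (rows.foldl
        (fun (st : List (List (String × String)) × Int) row =>
          let d := PySem.Dict.ofList row
          let val := PySem.Dict.getD d column ""
          let count := if pvMatches val target cs then st.2 + 1 else 0
          let out := (PySem.Dict.insert d dest' (PySem.Int.toStr count)).items
          (st.1 ++ [out], count))
        (res, c)).1 =
      res ++ List.zipWith
        (fun row count => (PySem.Dict.insert (PySem.Dict.ofList row) dest' (PySem.Int.toStr count)).items)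
        rows (pvStreaks column target cs c rows) := by
  induction rows with
  | nil => intro res c; simp
  | cons r rs ih =>
    intro res c
    simp only [List.foldl_cons, pvStreaks, List.zipWith_cons_cons]
    rw [ih]
    simp

-- ===== VERDICT (by name: the statement is the Claim_ definition above) =====
theorem streak_column_spec : Claim_equal_streak_column := by
  intro rows column target dest cs _
  unfold Spec_streak_column streak_column streak_column_alt
  dsimp only
  rw [pvFoldA_eq_zip column target (pvDest column dest) cs rows [] 0,
      pvCounts_eq_pvStreaks column target cs rows 0 (-1)]
  norm_num
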